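-- pv_equiv track=rewrite | github.com/FedeMPouzols/casa_pl_perf_analysis | src/casa_log_post_proc.py | prepare_colors_rows
-- ===== SOURCE A (Python) =====
-- def prepare_colors_rows(rows, len_cols):
--     colors_rows = []
--     colors_cells = []
--     for idx, row in enumerate(rows):
--         if 0 == (idx % 2):
--             colors_rows.append('white')
--             colors_cells.append( ['white'] * len_cols)
--         else:
--             colors_rows.append('lightgrey')
--             colors_cells.append( ['lightgrey'] * len_cols)
--
--     return (colors_rows, colors_cells)
-- ===== SOURCE B (Python) =====
-- def prepare_colors_rows(rows, len_cols):
--     pairs, odd = divmod(len(rows), 2)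
--     colors_rows = ['white', 'lightgrey'] * pairs + ['white'] * odd
--     colors_cells = []
--     for _ in range(pairs):
--         colors_cells.append(['white'] * len_cols)
--         colors_cells.append(['lightgrey'] * len_cols)
--     if odd:
--         colors_cells.append(['white'] * len_cols)
--     return (colors_rows, colors_cells)
-- ===== Notes on version B (the rewrite author's own statement) =====
-- stated objective: alternative
-- what changed: replaces A's per-element loop that tests idx%2 on every row with a closed-form block construction: divmod(len(rows),2) once, then the two-color block is replicated pairs times (list repetition for colors_rows, a loop over range(pairs) appending two cell rows at a time) plus one leftover white row when the length is odd
import Mathlib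
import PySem

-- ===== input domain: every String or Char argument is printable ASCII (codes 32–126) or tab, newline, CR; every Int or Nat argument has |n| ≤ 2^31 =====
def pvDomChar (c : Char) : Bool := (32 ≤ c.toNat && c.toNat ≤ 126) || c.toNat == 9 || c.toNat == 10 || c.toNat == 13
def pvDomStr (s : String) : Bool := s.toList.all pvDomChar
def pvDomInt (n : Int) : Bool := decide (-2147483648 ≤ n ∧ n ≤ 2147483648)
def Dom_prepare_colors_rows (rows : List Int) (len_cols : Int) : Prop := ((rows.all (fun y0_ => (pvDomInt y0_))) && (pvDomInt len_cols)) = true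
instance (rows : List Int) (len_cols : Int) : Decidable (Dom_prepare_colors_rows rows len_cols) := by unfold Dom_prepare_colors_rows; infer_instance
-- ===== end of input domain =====

-- B replaces A's per-element idx%2 loop by a closed-form block construction: divmod once,
-- replicate the two-color block pairs times, plus one leftover white row ('alternative').

-- ===== PORT A =====
-- the loop over enumerate(rows), appending to both accumulators; ['c'] * len_cols = replicate len_cols.toNat "c" (negative → [])
def prepare_colors_rows_loopA (todo : List (Int × Int)) (len_cols : Int)
    (colors_rows : List String) (colors_cells : List (List String)) :
    List String × List (List String) :=
  match todo with
  | [] => (colors_rows, colors_cells)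
  | (idx, _row) :: rest =>
    if 0 = PySem.Int.mod idx 2 then
      prepare_colors_rows_loopA rest len_cols
        (colors_rows ++ ["white"]) (colors_cells ++ [List.replicate len_cols.toNat "white"])
    else
      prepare_colors_rows_loopA rest len_cols
        (colors_rows ++ ["lightgrey"]) (colors_cells ++ [List.replicate len_cols.toNat "lightgrey"])

def prepare_colors_rows (rows : List Int) (len_cols : Int) : List String × List (List String) :=
  prepare_colors_rows_loopA (PySem.List.enumerate rows) len_cols [] []

-- ===== PORT B =====
-- the 'for _ in range(pairs)' loop, appending a white cell row then a grey cell row each iteration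
def prepare_colors_rows_loopB (pairs : Nat) (rw rg : List String)
    (acc : List (List String)) : List (List String) :=
  match pairs with
  | 0 => acc
  | k + 1 => prepare_colors_rows_loopB k rw rg (acc ++ [rw] ++ [rg])

def prepare_colors_rows_alt (rows : List Int) (len_cols : Int) : List String × List (List String) :=
  let pairs := rows.length / 2
  let odd := rows.length % 2
  let colors_rows := (List.replicate pairs ["white", "lightgrey"]).flatten ++ List.replicate odd "white"
  let cells := prepare_colors_rows_loopB pairs
      (List.replicate len_cols.toNat "white") (List.replicate len_cols.toNat "lightgrey") []
  let colors_cells := if odd ≠ 0 then cells ++ [List.replicate len_cols.toNat "white"] else cells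
  (colors_rows, colors_cells)

-- ===== PRECONDITION & SPEC =====
def Spec_prepare_colors_rows (rows : List Int) (len_cols : Int) (out : List String × List (List String)) : Prop := out = prepare_colors_rows_alt rows len_cols
instance (rows : List Int) (len_cols : Int) (out : List String × List (List String)) : Decidable (Spec_prepare_colors_rows rows len_cols out) := by unfold Spec_prepare_colors_rows; infer_instance

-- ===== CLAIM (what is proved, stated in full; the proofs are below) =====
def Claim_equal_prepare_colors_rows : Prop := ∀ (rows : List Int) (len_cols : Int), Dom_prepare_colors_rows rows len_cols → Spec_prepare_colors_rows rows len_cols (prepare_colors_rows rows len_cols)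

-- ===== LEMMAS AND PROOFS =====
-- A's loop unfolds to a map over enumerate (colors_rows) and its replication image (colors_cells).
theorem loopA_eq (todo : List (Int × Int)) (len_cols : Int)
    (cr : List String) (cc : List (List String)) :
    prepare_colors_rows_loopA todo len_cols cr cc =
      (cr ++ todo.map (fun p => if PySem.Int.mod p.1 2 = 0 then "white" else "lightgrey"),
       cc ++ (todo.map (fun p => if PySem.Int.mod p.1 2 = 0 then "white" else "lightgrey")).map
               (fun color => List.replicate len_cols.toNat color)) := by
  induction todo generalizing cr cc with
  | nil => simp [prepare_colors_rows_loopA]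
  | cons h t ih =>
    obtain ⟨idx, row⟩ := h
    by_cases hmod : PySem.Int.mod idx 2 = 0
    · rw [prepare_colors_rows_loopA, if_pos hmod.symm, ih]
      simp only [List.map_cons, if_pos hmod, List.append_assoc,
        List.singleton_append, List.map]
    · rw [prepare_colors_rows_loopA, if_neg (fun h => hmod h.symm), ih]
      simp only [List.map_cons, if_neg hmod, List.append_assoc,
        List.singleton_append, List.map]

-- A's colors_rows over enumerate depends only on the index parity: a map over List.range.
theorem enum_map_parity (rows : List Int) (s : Nat) :
    (PySem.List.enumerate rows (s : Int)).map
        (fun p => if PySem.Int.mod p.1 2 = 0 then "white" else "lightgrey") =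
      (List.range rows.length).map
        (fun k => if (s + k) % 2 = 0 then "white" else "lightgrey") := by
  induction rows generalizing s with
  | nil => simp [PySem.List.enumerate_nil]
  | cons x t ih =>
    rw [PySem.List.enumerate_cons]
    have h1 : ((s : Int) + 1) = ((s + 1 : Nat) : Int) := by push_cast; ring
    rw [List.map_cons, h1, ih]
    simp only [List.length_cons, List.range_succ_eq_map, List.map_cons, List.map_map]
    congr 1
    · have : PySem.Int.mod (s : Int) 2 = ((s % 2 : Nat) : Int) :=
        PySem.Int.mod_natCast s 2
      rw [this]
      by_cases h : s % 2 = 0 <;> simp [h] <;> omega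
    · apply List.map_congr_left
      intro k _
      simp only [Function.comp]
      have : s + 1 + k = s + (k + 1) := by omega
      rw [this]
-- The alternating pattern over List.range equals the replicated two-color block.
theorem range_parity_pattern (n : Nat) :
    (List.range n).map (fun k => if k % 2 = 0 then "white" else "lightgrey") =
      (List.replicate (n / 2) ["white", "lightgrey"]).flatten ++
        List.replicate (n % 2) "white" := by
  induction n using Nat.twoStepInduction with
  | zero => simp
  | one => simp [List.range_succ]
  | more n ih _ =>
    have hrange : List.range (n + 2) =
        0 :: 1 :: (List.range n).map (fun k => k + 2) := by
      rw [List.range_succ_eq_map, List.range_succ_eq_map]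
      simp [List.map_map, Function.comp]
    rw [hrange]
    have hdiv : (n + 2) / 2 = n / 2 + 1 := by omega
    have hmod : (n + 2) % 2 = n % 2 := by omega
    rw [hdiv, hmod]
    simp only [List.map_cons, List.map_map, List.replicate_succ, List.flatten_cons]
    have : ((fun k => if k % 2 = 0 then "white" else "lightgrey") ∘ fun k => k + 2) =
        (fun k => if k % 2 = 0 then "white" else "lightgrey") := by
      funext k
      simp only [Function.comp]
      congr 1
      simp [Nat.add_mod]
    rw [this, ih]
    simp

-- B's cell loop appends the block pairs times.
theorem loopB_eq (pairs : Nat) (rw rg : List String) (acc : List (List String)) :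
    prepare_colors_rows_loopB pairs rw rg acc =
      acc ++ (List.replicate pairs [rw, rg]).flatten := by
  induction pairs generalizing acc with
  | zero => simp [prepare_colors_rows_loopB]
  | succ k ih =>
    rw [prepare_colors_rows_loopB, ih]
    simp [List.replicate_succ, List.append_assoc]

-- ===== VERDICT (by name: the statement is the Claim_ definition above) =====
theorem prepare_colors_rows_spec : Claim_equal_prepare_colors_rows := by
  intro rows len_cols _
  unfold Spec_prepare_colors_rows prepare_colors_rows prepare_colors_rows_alt
  have henum : PySem.List.enumerate rows = PySem.List.enumerate rows ((0 : Nat) : Int) := by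
    norm_num
  rw [loopA_eq, henum, enum_map_parity]
  rcases Nat.mod_two_eq_zero_or_one rows.length with h | h <;>
    simp [loopB_eq, range_parity_pattern, h, List.map_append,
      List.map_flatten, List.map_replicate]
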